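-- pv_equiv track=rewrite | github.com/josteint/sidfinity | src/player/test_songs.py | strip_player_defines
-- ===== SOURCE A (Python) =====
-- def strip_player_defines(player_src):
--     """Remove #ifndef/define blocks for symbols we define in data section."""
--     lines = player_src.split("\n")
--     out = []
--     skip_depth = 0
--     defines_to_strip = {
--         "base", "SIDBASE", "FIRSTNOTE", "DEFAULTTEMPO", "ADPARAM", "SRPARAM",
--         "FIRSTNOHRINSTR", "FIRSTLEGATOINSTR",
--         "mt_songtbllo",  # triggers the whole dummy data block
--     }
--     i = 0
--     while i < len(lines):
--         line = lines[i].strip()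
--         if line.startswith("#ifndef"):
--             sym = line.split()[1] if len(line.split()) > 1 else ""
--             if sym in defines_to_strip:
--                 # Skip until matching #endif
--                 depth = 1
--                 i += 1
--                 while i < len(lines) and depth > 0:
--                     l = lines[i].strip()
--                     if l.startswith("#ifndef") or l.startswith("#ifdef"):
--                         depth += 1
--                     elif l.startswith("#endif"):
--                         depth -= 1
--                     i += 1
--                 continue
--         out.append(lines[i])
--         i += 1
--     return "\n".join(out)
-- ===== SOURCE B (Python) =====
-- def strip_player_defines(player_src):
--     """Remove #ifndef/define blocks for symbols we define in data section."""
--     defines_to_strip = {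
--         "base", "SIDBASE", "FIRSTNOTE", "DEFAULTTEMPO", "ADPARAM", "SRPARAM",
--         "FIRSTNOHRINSTR", "FIRSTLEGATOINSTR",
--         "mt_songtbllo",
--     }
--     out = []
--     skip_depth = 0
--     for raw in player_src.split("\n"):
--         line = raw.strip()
--         if skip_depth > 0:
--             if line.startswith("#ifndef") or line.startswith("#ifdef"):
--                 skip_depth += 1
--             elif line.startswith("#endif"):
--                 skip_depth -= 1
--         elif (line.startswith("#ifndef")
--               and len(line.split()) > 1
--               and line.split()[1] in defines_to_strip):
--             skip_depth = 1
--         else: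
--             out.append(raw)
--     return "\n".join(out)
-- ===== Notes on version B (the rewrite author's own statement) =====
-- stated objective: simpler
-- what changed: Replaced the index-based outer loop with a nested inner skipping loop by a single flat pass over the lines maintaining a persistent skip_depth counter.
import Mathlib
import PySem

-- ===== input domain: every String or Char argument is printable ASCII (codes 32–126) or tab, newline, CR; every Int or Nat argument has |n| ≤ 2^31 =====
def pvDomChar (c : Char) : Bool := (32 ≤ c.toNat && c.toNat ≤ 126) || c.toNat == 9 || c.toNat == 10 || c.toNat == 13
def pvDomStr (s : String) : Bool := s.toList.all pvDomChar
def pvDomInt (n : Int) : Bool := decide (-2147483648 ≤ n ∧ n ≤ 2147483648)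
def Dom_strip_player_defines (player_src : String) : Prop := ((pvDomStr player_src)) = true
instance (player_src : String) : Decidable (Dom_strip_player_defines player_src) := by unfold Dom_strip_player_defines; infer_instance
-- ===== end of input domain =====

-- B replaces A's nested inner skipping loop by one flat pass keeping a skip_depth counter (objective: simpler).

-- ===== PORT A =====
-- the set literal both Pythons build
def pvDefinesToStrip : PySem.Set String :=
  PySem.Set.ofList ["base", "SIDBASE", "FIRSTNOTE", "DEFAULTTEMPO", "ADPARAM", "SRPARAM",
                    "FIRSTNOHRINSTR", "FIRSTLEGATOINSTR", "mt_songtbllo"]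

-- A's inner `while i < len(lines) and depth > 0` loop: consumes lines, returns the remaining suffix
def pvSkipA : List String → Nat → List String
  | [], _ => []
  | l :: rest, depth =>
    if depth = 0 then l :: rest
    else
      let s := PySem.Str.strip l
      if PySem.Str.startswith s "#ifndef" || PySem.Str.startswith s "#ifdef" then
        pvSkipA rest (depth + 1)
      else if PySem.Str.startswith s "#endif" then
        pvSkipA rest (depth - 1)
      else
        pvSkipA rest depth

-- needed by pvOuterA's termination argument
theorem pvSkipA_length_le (ls : List String) (d : Nat) : (pvSkipA ls d).length ≤ ls.length := by
  induction ls generalizing d with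
  | nil => simp [pvSkipA]
  | cons l rest ih =>
    simp only [pvSkipA]
    split_ifs <;> simp <;> exact le_trans (ih _) (Nat.le_succ _)

-- A's outer `while i < len(lines)` loop
def pvOuterA : List String → List String
  | [] => []
  | l :: rest =>
    let line := PySem.Str.strip l
    if PySem.Str.startswith line "#ifndef" = true then
      let parts := PySem.Str.split₀ line
      let sym := if 1 < parts.length then parts[1]! else ""
      if PySem.Set.contains pvDefinesToStrip sym = true then
        pvOuterA (pvSkipA rest 1)
      else
        l :: pvOuterA rest
    else
      l :: pvOuterA rest
termination_by ls => ls.length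
decreasing_by
  · exact Nat.lt_succ_of_le (pvSkipA_length_le rest 1)
  · exact Nat.lt_succ_self _
  · exact Nat.lt_succ_self _

-- player_src.split("\n"): Str.split? is none only for sep = "", and the sep here is the literal "\n"
def strip_player_defines (player_src : String) : String :=
  PySem.Str.join "\n" (pvOuterA ((PySem.Str.split? player_src "\n").getD []))

-- ===== PORT B =====
-- one flat step of B's single loop: state = (skip_depth, out)
def pvStepB (st : Nat × List String) (raw : String) : Nat × List String :=
  let line := PySem.Str.strip raw
  if 0 < st.1 then
    if PySem.Str.startswith line "#ifndef" || PySem.Str.startswith line "#ifdef" then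
      (st.1 + 1, st.2)
    else if PySem.Str.startswith line "#endif" then
      (st.1 - 1, st.2)
    else
      st
  else if PySem.Str.startswith line "#ifndef" &&
          decide (1 < (PySem.Str.split₀ line).length) &&
          PySem.Set.contains pvDefinesToStrip (PySem.Str.split₀ line)[1]! then
    (1, st.2)
  else
    (st.1, st.2 ++ [raw])

def strip_player_defines_alt (player_src : String) : String :=
  PySem.Str.join "\n" (((PySem.Str.split? player_src "\n").getD []).foldl pvStepB (0, [])).2

-- ===== PRECONDITION & SPEC =====
def Spec_strip_player_defines (player_src : String) (out : String) : Prop := out = strip_player_defines_alt player_src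
instance (player_src : String) (out : String) : Decidable (Spec_strip_player_defines player_src out) := by unfold Spec_strip_player_defines; infer_instance

-- ===== CLAIM (what is proved, stated in full; the proofs are below) =====
def Claim_equal_strip_player_defines : Prop := ∀ (player_src : String), Dom_strip_player_defines player_src → Spec_strip_player_defines player_src (strip_player_defines player_src)

-- ===== LEMMAS AND PROOFS =====

theorem pvSkipA_zero (ls : List String) : pvSkipA ls 0 = ls := by
  cases ls <;> simp [pvSkipA]

-- while skip_depth > 0, the flat fold appends nothing and reaches the same suffix as A's inner loop
theorem pv_fold_skip (ls : List String) (d : Nat) (acc : List String) (hd : 0 < d) :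
    (ls.foldl pvStepB (d, acc)).2 = ((pvSkipA ls d).foldl pvStepB (0, acc)).2 := by
  induction ls generalizing d with
  | nil => simp [pvSkipA]
  | cons l rest ih =>
    simp only [List.foldl_cons, pvStepB, pvSkipA]
    rw [if_neg (by omega : ¬ d = 0), if_pos hd]
    split_ifs with h1 h2
    · exact ih (d + 1) (by omega)
    · by_cases hd1 : d = 1
      · subst hd1; simp [pvSkipA_zero]
      · exact ih (d - 1) (by omega)
    · exact ih d hd

theorem pv_set_empty : "" ∉ pvDefinesToStrip := by
  simp only [pvDefinesToStrip, PySem.Set.mem_ofList]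
  simp

-- B's guard equals A's `sym in defines_to_strip` with sym = parts[1] if len(parts) > 1 else ""
theorem pv_sym_cond (b : Bool) (parts : List String) :
    (b && decide (1 < parts.length) && PySem.Set.contains pvDefinesToStrip parts[1]!) =
    (b && PySem.Set.contains pvDefinesToStrip (if 1 < parts.length then parts[1]! else "")) := by
  by_cases h : 1 < parts.length
  · simp [h]
  · simp [h, pv_set_empty]

-- at skip_depth 0 the flat fold emits exactly what A's outer loop emits
theorem pv_fold_outer (ls acc : List String) :
    (ls.foldl pvStepB (0, acc)).2 = acc ++ pvOuterA ls := by
  generalize hn : ls.length = n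
  induction n using Nat.strong_induction_on generalizing ls acc with
  | _ n ih =>
    cases ls with
    | nil => simp [pvOuterA]
    | cons l rest =>
      subst hn
      simp only [List.foldl_cons, pvStepB, pvOuterA]
      rw [if_neg (lt_irrefl 0), pv_sym_cond]
      by_cases h1 : PySem.Str.startswith (PySem.Str.strip l) "#ifndef" = true
      · simp only [h1, Bool.true_and, if_pos]
        by_cases h2 : PySem.Set.contains pvDefinesToStrip
            (if 1 < (PySem.Str.split₀ (PySem.Str.strip l)).length
             then (PySem.Str.split₀ (PySem.Str.strip l))[1]! else "") = true
        · simp only [h2, if_pos]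
          rw [pv_fold_skip rest 1 acc (by omega),
              ih (pvSkipA rest 1).length
                 (Nat.lt_succ_of_le (pvSkipA_length_le rest 1)) _ _ rfl]
        · simp only [h2, Bool.false_eq_true, if_false]
          rw [ih rest.length (Nat.lt_succ_self _) _ _ rfl]
          simp
      · simp only [Bool.not_eq_true] at h1
        simp only [h1, Bool.false_and, Bool.false_eq_true, if_false]
        rw [ih rest.length (Nat.lt_succ_self _) _ _ rfl]
        simp

-- ===== VERDICT (by name: the statement is the Claim_ definition above) =====
theorem strip_player_defines_spec : Claim_equal_strip_player_defines := by
  intro player_src _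
  unfold Spec_strip_player_defines strip_player_defines strip_player_defines_alt
  rw [pv_fold_outer]
  simp
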